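-- pv_equiv track=rewrite | github.com/longevitycoach/StrunzKnowledge | src/analysis/create_visualizations.py | analyze_monthly_pattern
-- ===== SOURCE A (Python) =====
-- from collections import Counter, defaultdict
--
-- def analyze_monthly_pattern(documents, year):
--     """Analyze monthly posting pattern for a specific year."""
--     monthly_posts = defaultdict(int)
--
--     for doc in documents:
--         date = doc.get('metadata', {}).get('post_date', '')
--
--         if date and date.startswith(year):
--             month = date[5:7]
--             monthly_posts[month] += 1
--
--     return dict(sorted(monthly_posts.items()))
-- ===== SOURCE B (Python) =====
-- from itertools import groupby
--
-- def analyze_monthly_pattern(documents, year):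
--     """Analyze monthly posting pattern for a specific year."""
--     months = []
--     for doc in documents:
--         date = doc.get('metadata', {}).get('post_date', '')
--         if date and date.startswith(year):
--             months.append(date[5:7])
--     return {m: sum(1 for _ in g) for m, g in groupby(sorted(months))}
-- ===== Notes on version B (the rewrite author's own statement) =====
-- stated objective: alternative
-- what changed: A counts matching months into a defaultdict and sorts the (month, count) items at the end; B collects the matching months into a list, sorts the list, and builds the result by counting consecutive runs with itertools.groupby, whose keys come out already in sorted order.
import Mathlib
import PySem

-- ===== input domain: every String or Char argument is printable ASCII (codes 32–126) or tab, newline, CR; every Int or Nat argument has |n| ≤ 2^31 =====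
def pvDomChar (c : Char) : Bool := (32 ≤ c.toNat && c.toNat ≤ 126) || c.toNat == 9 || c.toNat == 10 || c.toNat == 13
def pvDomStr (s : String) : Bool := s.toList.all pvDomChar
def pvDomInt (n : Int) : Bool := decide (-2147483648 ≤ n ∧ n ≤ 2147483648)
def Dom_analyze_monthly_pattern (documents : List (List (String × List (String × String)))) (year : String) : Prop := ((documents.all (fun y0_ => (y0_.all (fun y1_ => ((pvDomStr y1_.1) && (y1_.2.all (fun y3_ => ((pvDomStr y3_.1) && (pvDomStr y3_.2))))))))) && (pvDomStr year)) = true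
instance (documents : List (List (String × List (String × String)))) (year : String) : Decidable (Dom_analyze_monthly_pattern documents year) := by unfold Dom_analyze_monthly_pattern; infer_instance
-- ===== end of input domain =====

-- B replaces A's defaultdict counting by collecting the matching months, sorting them and
-- counting consecutive runs (itertools.groupby); objective: alternative algorithm, same result.

-- ===== PORT A =====
def analyze_monthly_pattern (documents : List (List (String × List (String × String)))) (year : String) : List (String × Int) :=
  let monthly_posts : PySem.Dict String Int :=
    documents.foldl (fun monthly_posts doc =>
      let date := PySem.Dict.getD ⟨PySem.Dict.getD ⟨doc⟩ "metadata" []⟩ "post_date" ""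
      if date ≠ "" ∧ PySem.Str.startswith date year = true then
        let month := PySem.Str.slice date (some 5) (some 7)
        monthly_posts.insert month (monthly_posts.getD month 0 + 1)
      else monthly_posts) PySem.Dict.empty
  PySem.List.sorted2 monthly_posts.items Prod.fst Prod.snd

-- ===== PORT B =====
-- groupby(sorted(months)) with sum(1 for _ in g): one run = the head plus the takeWhile-equal prefix
def pvGroupCount : List String → List (String × Int)
  | [] => []
  | m :: rest =>
      (m, 1 + ((rest.takeWhile (· == m)).length : Int)) ::
        pvGroupCount (rest.dropWhile (· == m))
termination_by S => S.length
decreasing_by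
  simpa using Nat.lt_succ_of_le (List.length_dropWhile_le _ _)

def analyze_monthly_pattern_alt (documents : List (List (String × List (String × String)))) (year : String) : List (String × Int) :=
  let months : List String :=
    documents.foldl (fun months doc =>
      let date := PySem.Dict.getD ⟨PySem.Dict.getD ⟨doc⟩ "metadata" []⟩ "post_date" ""
      if date ≠ "" ∧ PySem.Str.startswith date year = true then
        months ++ [PySem.Str.slice date (some 5) (some 7)]
      else months) []
  pvGroupCount (PySem.List.sorted months (fun x => x))

-- ===== PRECONDITION & SPEC =====
def Spec_analyze_monthly_pattern (documents : List (List (String × List (String × String)))) (year : String) (out : List (String × Int)) : Prop := out = analyze_monthly_pattern_alt documents year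
instance (documents : List (List (String × List (String × String)))) (year : String) (out : List (String × Int)) : Decidable (Spec_analyze_monthly_pattern documents year out) := by unfold Spec_analyze_monthly_pattern; infer_instance

-- ===== CLAIM (what is proved, stated in full; the proofs are below) =====
def Claim_equal_analyze_monthly_pattern : Prop := ∀ (documents : List (List (String × List (String × String)))) (year : String), Dom_analyze_monthly_pattern documents year → Spec_analyze_monthly_pattern documents year (analyze_monthly_pattern documents year)

-- ===== LEMMAS AND PROOFS =====

-- the per-document date, match test and extracted month shared by both loops
def pvDate (doc : List (String × List (String × String))) : String :=
  PySem.Dict.getD ⟨PySem.Dict.getD ⟨doc⟩ "metadata" []⟩ "post_date" ""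

-- (abbrev so that decidability of the test is found by unfolding, without an extra instance)
abbrev pvP (year : String) (doc : List (String × List (String × String))) : Prop :=
  pvDate doc ≠ "" ∧ PySem.Str.startswith (pvDate doc) year = true

def pvMonth (doc : List (String × List (String × String))) : String :=
  PySem.Str.slice (pvDate doc) (some 5) (some 7)

-- the list of matching months, in document order
def pvMonths (documents : List (List (String × List (String × String)))) (year : String) : List String :=
  (documents.filter (fun doc => decide (pvP year doc))).map pvMonth

lemma pvMonths_cons (doc : List (String × List (String × String)))
    (docs : List (List (String × List (String × String)))) (year : String) :
    pvMonths (doc :: docs) year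
      = (if pvP year doc then [pvMonth doc] else []) ++ pvMonths docs year := by
  simp only [pvMonths, List.filter_cons]
  by_cases h : pvP year doc
  · rw [if_pos h, decide_eq_true h]
    simp [pvMonths]
  · rw [if_neg h, decide_eq_false h]
    simp [pvMonths]

lemma pvA_fold_eq (documents : List (List (String × List (String × String)))) (year : String)
    (d : PySem.Dict String Int) :
    documents.foldl (fun monthly_posts doc =>
      if pvP year doc then
        monthly_posts.insert (pvMonth doc) (monthly_posts.getD (pvMonth doc) 0 + 1)
      else monthly_posts) d
    = (pvMonths documents year).foldl (fun d m => d.insert m (d.getD m 0 + 1)) d := by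
  induction documents generalizing d with
  | nil => simp [pvMonths]
  | cons doc docs ih =>
      simp only [List.foldl_cons]
      by_cases h : pvP year doc
      · rw [if_pos h, pvMonths_cons, if_pos h]
        simp only [List.singleton_append, List.foldl_cons]
        exact ih _
      · rw [if_neg h, pvMonths_cons, if_neg h]
        simp only [List.nil_append]
        exact ih _

lemma pvB_fold_eq (documents : List (List (String × List (String × String)))) (year : String)
    (acc : List String) :
    documents.foldl (fun months doc =>
      if pvP year doc then months ++ [pvMonth doc] else months) acc
    = acc ++ pvMonths documents year := by
  induction documents generalizing acc with
  | nil => simp [pvMonths]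
  | cons doc docs ih =>
      simp only [List.foldl_cons]
      by_cases h : pvP year doc
      · rw [if_pos h, pvMonths_cons, if_pos h, ih]
        simp
      · rw [if_neg h, pvMonths_cons, if_neg h, ih]
        simp

-- insertBy only compares-- insertBy only compares the inserted element against accumulator elements
lemma insertBy_congr {α : Type} (b1 b2 : α → α → Bool) (x : α) (acc : List α)
    (h : ∀ y ∈ acc, b1 x y = b2 x y) :
    PySem.List.insertBy b1 x acc = PySem.List.insertBy b2 x acc := by
  induction acc with
  | nil => rfl
  | cons y ys ih =>
      simp only [PySem.List.insertBy]
      rw [h y (List.mem_cons_self)]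
      split
      · rfl
      · rw [ih (fun z hz => h z (List.mem_cons_of_mem _ hz))]

lemma foldl_insertBy_congr {α : Type} (b1 b2 : α → α → Bool) (xs acc : List α)
    (h : ∀ x ∈ xs, ∀ y, (y ∈ acc ∨ y ∈ xs) → b1 x y = b2 x y) :
    xs.foldl (fun a x => PySem.List.insertBy b1 x a) acc
      = xs.foldl (fun a x => PySem.List.insertBy b2 x a) acc := by
  induction xs generalizing acc with
  | nil => rfl
  | cons x xs ih =>
      simp only [List.foldl_cons]
      rw [insertBy_congr b1 b2 x acc
        (fun y hy => h x (List.mem_cons_self) y (Or.inl hy))]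
      exact ih _ (fun z hz y hy => by
        refine h z (List.mem_cons_of_mem _ hz) y ?_
        rcases hy with hy | hy
        · rcases (PySem.List.mem_insertBy _ _ _ _).1 hy with rfl | hy
          · exact Or.inr List.mem_cons_self
          · exact Or.inl hy
        · exact Or.inr (List.mem_cons_of_mem _ hy))

-- Python sorts the (key, count) pairs as tuples; since the keys are distinct the
-- second component is never consulted
lemma sorted2_eq_sorted_fst {α : Type} (xs : List α) (k1 : α → String) (k2 : α → Int)
    (h : (xs.map k1).Nodup) :
    PySem.List.sorted2 xs k1 k2 = PySem.List.sorted xs k1 := by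
  rw [PySem.List.sorted_eq_foldl_insertBy]
  show xs.foldl (fun a x => PySem.List.insertBy
      (fun a b => decide (k1 a < k1 b) || !decide (k1 b < k1 a) && decide (k2 a < k2 b)) x a) []
    = xs.foldl (fun a x => PySem.List.insertBy (fun a b => decide (k1 a < k1 b)) x a) []
  refine foldl_insertBy_congr _ _ xs [] (fun x hx y hy => ?_)
  rcases hy with hy | hy
  · cases hy
  by_cases hk : k1 x = k1 y
  · have := List.inj_on_of_nodup_map h hx hy hk
    subst this
    simp
  · rcases lt_or_gt_of_ne hk with hlt | hgt
    · simp [hlt, not_lt_of_gt hlt]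
    · simp [hgt, not_lt_of_gt hgt]

lemma pvDropWhileHeadFalse {α : Type} (p : α → Bool) :
    ∀ (l : List α) (x : α) (xs : List α), l.dropWhile p = x :: xs → p x = false := by
  intro l
  induction l with
  | nil => intro x xs h; cases h
  | cons y ys ih =>
      intro x xs h
      by_cases hp : p y = true
      · rw [List.dropWhile_cons_of_pos hp] at h
        exact ih x xs h
      · rw [List.dropWhile_cons_of_neg hp] at h
        cases h
        simpa using hp

-- run-length counting of a (≤)-sorted list is the strictly sorted distinct keys with their counts
lemma groupCount_sorted_aux (n : Nat) : ∀ S : List String, S.length ≤ n → S.Pairwise (· ≤ ·) →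
    pvGroupCount S
      = (PySem.List.sorted (PySem.Set.ofList S) (fun x => x)).map
          (fun k => (k, (S.count k : Int))) := by
  induction n with
  | zero =>
      intro S hS _
      have : S = [] := List.length_eq_zero_iff.1 (Nat.le_zero.1 hS)
      subst this
      rw [pvGroupCount]
      rfl
  | succ n ih =>
      intro S hS hpw
      match S, hpw with
      | [], _ =>
        rw [pvGroupCount]
        rfl
      | x :: rest, hpw =>
        have hx : ∀ y ∈ rest, x ≤ y := (List.pairwise_cons.1 hpw).1
        have hrest : rest.Pairwise (· ≤ ·) := (List.pairwise_cons.1 hpw).2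
        set t := rest.takeWhile (· == x) with ht
        set d := rest.dropWhile (· == x) with hd
        have hsplit : rest = t ++ d := (List.takeWhile_append_dropWhile).symm
        have htx : ∀ y ∈ t, y = x := by
          intro y hy
          have := List.mem_takeWhile_imp hy
          simpa using this
        have hdlt : ∀ y ∈ d, x < y := by
          intro y hy
          cases hdd : d with
          | nil => rw [hdd] at hy; cases hy
          | cons h0 d' =>
                rw [hdd] at hy
                have hh0 : (h0 == x) = false :=
                  pvDropWhileHeadFalse (· == x) rest h0 d' (by rw [← hd, hdd])
                have hh0x : h0 ≠ x := by simpa using hh0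
                have hh0rest : h0 ∈ rest := by
                  rw [hsplit, hdd]
                  exact List.mem_append_right _ List.mem_cons_self
                have hxh0 : x < h0 := lt_of_le_of_ne (hx h0 hh0rest) (Ne.symm hh0x)
                have hdpw : (h0 :: d').Pairwise (· ≤ ·) := by
                  have hsub : d.Sublist rest := hd ▸ List.dropWhile_sublist _
                  exact hrest.sublist (hdd ▸ hsub)
                rcases List.mem_cons.1 hy with rfl | hy'
                · exact hxh0
                · exact lt_of_lt_of_le hxh0 ((List.pairwise_cons.1 hdpw).1 y hy')
        have hxd : x ∉ d := fun hxn => lt_irrefl x (hdlt x hxn)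
        have hdpw : d.Pairwise (· ≤ ·) := hrest.sublist (hd ▸ List.dropWhile_sublist _)
        have hdlen : d.length ≤ n := by
          have h1 : d.length ≤ rest.length := hd ▸ List.length_dropWhile_le _ _
          have hr : rest.length ≤ n := by simpa using Nat.succ_le_succ_iff.1 hS
          omega
        -- the head group
        have hcount_x : ((x :: rest).count x : Int) = 1 + (t.length : Int) := by
          have h1 : t.count x = t.length :=
            List.count_eq_length.2 (fun y hy => by simp [htx y hy])
          have h2 : d.count x = 0 := List.count_eq_zero.2 hxd
          have : (x :: rest).count x = 1 + t.length := by
            rw [hsplit]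
            simp [List.count_append, h1, h2, Nat.add_comm]
          rw [this]; push_cast; ring
        -- counts of later keys ignore the head group
        have hcount_d : ∀ k ∈ d, (x :: rest).count k = d.count k := by
          intro k hk
          have hkx : k ≠ x := fun h => lt_irrefl x (h ▸ hdlt k hk)
          have hkt : k ∉ t := fun h => hkx (htx k h)
          rw [hsplit]
          simp [List.count_append, List.count_eq_zero.2 hkt, Ne.symm hkx]
        -- sorted set of the whole list is x followed by sorted set of d
        have hset : PySem.List.sorted (PySem.Set.ofList (x :: rest)) (fun x => x)
            = x :: PySem.List.sorted (PySem.Set.ofList d) (fun x => x) := by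
          apply PySem.List.sorted_eq_of_perm_of_pairwise_lt
          · apply (List.perm_ext_iff_of_nodup _ _).2
            · intro y
              constructor
              · intro hy
                rcases List.mem_cons.1 hy with rfl | hy'
                · exact (PySem.Set.mem_ofList _ _).2 List.mem_cons_self
                · have : y ∈ d := (PySem.Set.mem_ofList _ _).1
                    (by simpa using (PySem.List.mem_sorted _ _ _ _).1 hy')
                  exact (PySem.Set.mem_ofList _ _).2
                    (List.mem_cons_of_mem _ (hsplit ▸ List.mem_append_right _ this))
              · intro hy
                have hy' := (PySem.Set.mem_ofList _ _).1 hy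
                rcases List.mem_cons.1 hy' with rfl | hy'
                · exact List.mem_cons_self
                · rw [hsplit] at hy'
                  rcases List.mem_append.1 hy' with hy'' | hy''
                  · rw [htx y hy'']; exact List.mem_cons_self
                  · exact List.mem_cons_of_mem _
                      ((PySem.List.mem_sorted _ _ _ _).2 ((PySem.Set.mem_ofList _ _).2 hy''))
            · refine List.nodup_cons.2 ⟨?_, ?_⟩
              · intro hxmem
                exact hxd ((PySem.Set.mem_ofList _ _).1
                  (by simpa using (PySem.List.mem_sorted _ _ _ _).1 hxmem))
              · exact ((PySem.List.sorted_perm _ _ false).symm.nodup) (PySem.Set.nodup_ofList _)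
            · exact PySem.Set.nodup_ofList _
          · refine List.pairwise_cons.2 ⟨?_, ?_⟩
            · intro y hy
              exact hdlt y ((PySem.Set.mem_ofList _ _).1
                (by simpa using (PySem.List.mem_sorted _ _ _ _).1 hy))
            · exact PySem.List.sorted_ofList_pairwise_lt _
        -- assemble
        have hgc : pvGroupCount (x :: rest)
            = (x, 1 + (t.length : Int)) :: pvGroupCount d := by
          rw [pvGroupCount]
        rw [hgc, hset, List.map_cons, ih d hdlen hdpw, ← hcount_x]
        congr 1
        apply List.map_congr_left
        intro k hk
        have : k ∈ d := (PySem.Set.mem_ofList _ _).1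
          (by simpa using (PySem.List.mem_sorted _ _ _ _).1 hk)
        rw [hcount_d k this]

lemma groupCount_sorted (S : List String) (hpw : S.Pairwise (· ≤ ·)) :
    pvGroupCount S
      = (PySem.List.sorted (PySem.Set.ofList S) (fun x => x)).map
          (fun k => (k, (S.count k : Int))) :=
  groupCount_sorted_aux S.length S le_rfl hpw

-- ===== VERDICT (by name: the statement is the Claim_ definition above) =====
theorem analyze_monthly_pattern_spec : Claim_equal_analyze_monthly_pattern := by
  intro documents year _
  unfold Spec_analyze_monthly_pattern
  show PySem.List.sorted2
      (documents.foldl (fun monthly_posts doc =>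
        if pvP year doc then
          monthly_posts.insert (pvMonth doc) (monthly_posts.getD (pvMonth doc) 0 + 1)
        else monthly_posts) PySem.Dict.empty).items Prod.fst Prod.snd
    = pvGroupCount (PySem.List.sorted
        (documents.foldl (fun months doc =>
          if pvP year doc then months ++ [pvMonth doc] else months) []) (fun x => x))
  rw [pvA_fold_eq, pvB_fold_eq]
  set ms := pvMonths documents year with hms
  simp only [List.nil_append]
  -- A side: the dict fold is Counter(ms)
  rw [PySem.Dict.foldl_insert_getD_add_one_eq_counter, PySem.Dict.items_counter]
  -- the tuple sort never consults the counts (keys are distinct)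
  rw [sorted2_eq_sorted_fst _ _ _ (by
    rw [List.map_map]
    have hid : (Prod.fst ∘ fun k => (k, (ms.count k : Int))) = fun k => k := rfl
    rw [hid, show (fun k : String => k) = id from rfl, List.map_id]
    exact PySem.Set.nodup_ofList ms)]
  -- both sides are the strictly sorted distinct months paired with their counts
  have hA : PySem.List.sorted ((PySem.Set.ofList ms : List String).map
        (fun k => (k, (ms.count k : Int)))) Prod.fst
      = (PySem.List.sorted (PySem.Set.ofList ms) (fun x => x)).map
          (fun k => (k, (ms.count k : Int))) := by
    apply PySem.List.sorted_eq_of_perm_of_pairwise_lt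
    · exact (PySem.List.sorted_perm _ _ false).map _
    · exact List.pairwise_map.2 (by
        simpa using PySem.List.sorted_ofList_pairwise_lt ms)
  rw [hA, groupCount_sorted _ (PySem.List.sorted_pairwise ms (fun x => x))]
  -- identify the two sorted key lists and the two count functions
  have hperm : (PySem.List.sorted ms (fun x => x)).Perm ms := PySem.List.sorted_perm _ _ false
  have hsetperm : (PySem.Set.ofList (PySem.List.sorted ms (fun x => x)) : List String).Perm
      (PySem.Set.ofList ms) := by
    apply (List.perm_ext_iff_of_nodup (PySem.Set.nodup_ofList _) (PySem.Set.nodup_ofList _)).2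
    intro y
    rw [PySem.Set.mem_ofList, PySem.Set.mem_ofList, hperm.mem_iff]
  rw [PySem.List.sorted_eq_sorted_of_perm _ _ _ (fun a b h => h) hsetperm]
  apply List.map_congr_left
  intro k _
  rw [hperm.count_eq]
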